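-- pv_equiv track=rewrite | github.com/genesislabs-research/Timmy-The-Cognitive-Loop-s-Language-Interface | teaching/frame_recognizer_t.py | _match_pattern_at
-- ===== SOURCE A (Python) =====
-- from typing import Any, Dict, List, Optional
--
-- def _is_wildcard(token: str) -> bool:
--     """Return True if a pattern token is a wildcard."""
--     return (
--         len(token) >= 2
--         and token.startswith("<")
--         and token.endswith(">")
--     )
--
-- def _match_pattern_at(
--     input_tokens: List[str],
--     pattern: List[str],
--     start: int,
-- ) -> Optional[Dict[str, str]]:
--     """Try to match `pattern` against `input_tokens[start:]`.
--
--     Returns a dict of wildcard bindings on success, or None on failure.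
--     The match requires exactly len(pattern) tokens starting at `start`.
--     Each non-wildcard pattern token must equal the corresponding input
--     token. Each wildcard pattern token matches any input token and
--     binds the input token under its wildcard name.
--
--     Args:
--         input_tokens: the instructor's input as a token list.
--         pattern: the frame's token pattern.
--         start: starting index in input_tokens.
--
--     Returns:
--         dict of {wildcard_name: input_token} on success, None on
--             failure.
--     """
--     if start + len(pattern) > len(input_tokens):
--         return None
--     bindings: Dict[str, str] = {}
--     for i, ptok in enumerate(pattern):
--         itok = input_tokens[start + i]
--         if _is_wildcard(ptok):
--             # First binding wins for repeated wildcards.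
--             if ptok not in bindings:
--                 bindings[ptok] = itok
--             else:
--                 # If the wildcard is repeated and the second
--                 # occurrence does not match the binding, fail.
--                 if bindings[ptok] != itok:
--                     return None
--         else:
--             if itok != ptok:
--                 return None
--     return bindings
-- ===== SOURCE B (Python) =====
-- from typing import Dict, List, Optional
--
--
-- def _is_wildcard(token: str) -> bool:
--     """Return True if a pattern token is a wildcard."""
--     return (
--         len(token) >= 2
--         and token.startswith("<")
--         and token.endswith(">")
--     )
--
--
-- def _match_pattern_at(
--     input_tokens: List[str],
--     pattern: List[str],
--     start: int,
-- ) -> Optional[Dict[str, str]]: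
--     """Two-pass matcher: literal check pass, then group-and-validate pass."""
--     n = len(pattern)
--     if start + n > len(input_tokens):
--         return None
--     window = [input_tokens[start + i] for i in range(n)]
--     # Pass 1: every non-wildcard pattern token must equal its input token.
--     if any(not _is_wildcard(p) and p != t for p, t in zip(pattern, window)):
--         return None
--     # Pass 2: group the input tokens seen at each wildcard's positions.
--     groups: Dict[str, List[str]] = {}
--     for p, t in zip(pattern, window):
--         if _is_wildcard(p):
--             groups[p] = groups.get(p, []) + [t]
--     # A wildcard bound to two distinct tokens is a failed match.
--     if any(t != ts[0] for ts in groups.values() for t in ts):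
--         return None
--     return {name: ts[0] for name, ts in groups.items()}
-- ===== Notes on version B (the rewrite author's own statement) =====
-- stated objective: alternative
-- what changed: Replaces A's single early-exit scan that interleaves literal checks with incremental first-binding bookkeeping by a windowed two-pass scheme: one pass checks all literal positions, a second groups the input tokens seen at each wildcard's positions into lists and then validates that every group is constant, extracting the first element as the binding.
import Mathlib
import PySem

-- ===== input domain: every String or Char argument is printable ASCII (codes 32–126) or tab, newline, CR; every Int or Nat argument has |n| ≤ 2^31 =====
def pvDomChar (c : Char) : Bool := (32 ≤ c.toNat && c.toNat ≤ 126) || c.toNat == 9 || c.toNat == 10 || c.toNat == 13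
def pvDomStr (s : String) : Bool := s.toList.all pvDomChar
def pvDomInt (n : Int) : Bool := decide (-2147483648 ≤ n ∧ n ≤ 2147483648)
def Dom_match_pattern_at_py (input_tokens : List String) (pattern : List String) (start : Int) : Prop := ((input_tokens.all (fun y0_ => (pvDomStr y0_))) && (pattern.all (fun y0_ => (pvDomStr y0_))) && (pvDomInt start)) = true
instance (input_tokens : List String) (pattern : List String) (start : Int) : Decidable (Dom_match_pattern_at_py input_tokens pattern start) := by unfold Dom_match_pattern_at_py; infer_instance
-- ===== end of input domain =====

-- ===== PORT A =====
-- B changes decomposition only (two-pass group-then-validate instead of A's interleaved early-exit scan);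
-- same O(n) cost, exact same return value; no speed claim.

-- module helper _is_wildcard, shared verbatim by both Pythons
def pv_is_wildcard (token : String) : Bool :=
  decide (2 ≤ PySem.Str.len token) && PySem.Str.startswith token "<" && PySem.Str.endswith token ">"

-- A's loop `for i, ptok in enumerate(pattern): itok = input_tokens[start+i]; ...`,
-- carrying the absolute index start+i; `none` on the pyGet? fetch = IndexError (only outside Pre_).
def pvLoopA (input : List String) : List String → Int → PySem.Dict String String → Option (List (String × String))
  | [], _, bindings => some bindings.items
  | ptok :: rest, idx, bindings =>
    match PySem.List.pyGet? input idx with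
    | none => none   -- IndexError (outside Pre_)
    | some itok =>
      if pv_is_wildcard ptok then
        match bindings.get? ptok with
        | none => pvLoopA input rest (idx + 1) (bindings.insert ptok itok)   -- `if ptok not in bindings`
        | some v => if v ≠ itok then none else pvLoopA input rest (idx + 1) bindings
      else
        if itok ≠ ptok then none else pvLoopA input rest (idx + 1) bindings

def match_pattern_at_py (input_tokens : List String) (pattern : List String) (start : Int) : Option (List (String × String)) :=
  if start + (pattern.length : Int) > (input_tokens.length : Int) then none
  else pvLoopA input_tokens pattern start PySem.Dict.empty

-- ===== PORT B =====
-- the comprehension [input_tokens[start + i] for i in range(n)]; none = IndexError (only outside Pre_)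
def pvWindow (input : List String) : Int → Nat → Option (List String)
  | _, 0 => some []
  | idx, n + 1 =>
    match PySem.List.pyGet? input idx, pvWindow input (idx + 1) n with
    | some t, some w => some (t :: w)
    | _, _ => none

def match_pattern_at_py_alt (input_tokens : List String) (pattern : List String) (start : Int) : Option (List (String × String)) :=
  let n := pattern.length
  if start + (n : Int) > (input_tokens.length : Int) then none
  else
    match pvWindow input_tokens start n with
    | none => none   -- IndexError in the comprehension (only outside Pre_)
    | some window =>
      -- pass 1: every non-wildcard pattern token must equal its input token
      if (pattern.zip window).any (fun pt => !(pv_is_wildcard pt.1) && pt.1 != pt.2) then none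
      else
        -- pass 2: groups[p] = groups.get(p, []) + [t] at each wildcard position
        let groups := (pattern.zip window).foldl
          (fun g pt => if pv_is_wildcard pt.1 then g.insert pt.1 (g.getD pt.1 [] ++ [pt.2]) else g)
          (PySem.Dict.empty : PySem.Dict String (List String))
        -- a wildcard bound to two distinct tokens fails; ts[0] rendered as headD "" (groups' lists are nonempty by construction)
        if groups.values.any (fun ts => ts.any (fun t => t != ts.headD "")) then none
        else some (groups.items.map (fun kts => (kts.1, kts.2.headD "")))

-- ===== PRECONDITION & SPEC =====
-- Pre_ excludes exactly the inputs where A raises IndexError: the length guard passes, the pattern is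
-- nonempty and start < -len(input_tokens), so the first access input_tokens[start] is out of range.
def Pre_match_pattern_at_py (input_tokens : List String) (pattern : List String) (start : Int) : Prop :=
  (input_tokens.length : Int) < start + (pattern.length : Int) ∨ pattern = [] ∨ -(input_tokens.length : Int) ≤ start
instance (input_tokens : List String) (pattern : List String) (start : Int) : Decidable (Pre_match_pattern_at_py input_tokens pattern start) := by unfold Pre_match_pattern_at_py; infer_instance

def pvWitness_match_pattern_at_py : List String × List String × Int := (["the", "cat", "sat"], ["the", "<x>"], 0)

def Spec_match_pattern_at_py (input_tokens : List String) (pattern : List String) (start : Int) (out : Option (List (String × String))) : Prop := out = match_pattern_at_py_alt input_tokens pattern start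
instance (input_tokens : List String) (pattern : List String) (start : Int) (out : Option (List (String × String))) : Decidable (Spec_match_pattern_at_py input_tokens pattern start out) := by unfold Spec_match_pattern_at_py; infer_instance

-- ===== CLAIM (what is proved, stated in full; the proofs are below) =====
def Claim_equal_match_pattern_at_py : Prop := ∀ (input_tokens : List String) (pattern : List String) (start : Int), Dom_match_pattern_at_py input_tokens pattern start → Pre_match_pattern_at_py input_tokens pattern start → Spec_match_pattern_at_py input_tokens pattern start (match_pattern_at_py input_tokens pattern start)

-- ===== LEMMAS AND PROOFS =====

def pvGoA : List (String × String) → PySem.Dict String String → Option (List (String × String))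
  | [], bindings => some bindings.items
  | (ptok, itok) :: rest, bindings =>
    if pv_is_wildcard ptok then
      match bindings.get? ptok with
      | none => pvGoA rest (bindings.insert ptok itok)
      | some v => if v ≠ itok then none else pvGoA rest bindings
    else
      if itok ≠ ptok then none else pvGoA rest bindings
def pvFoldG (pairs : List (String × String)) (g : PySem.Dict String (List String)) : PySem.Dict String (List String) :=
  pairs.foldl (fun g pt => if pv_is_wildcard pt.1 then g.insert pt.1 (g.getD pt.1 [] ++ [pt.2]) else g) g
def pvFinish (g : PySem.Dict String (List String)) : Option (List (String × String)) :=
  if g.values.any (fun ts => ts.any (fun t => t != ts.headD "")) then none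
  else some (g.items.map (fun kts => (kts.1, kts.2.headD "")))
def pvInv (g : PySem.Dict String (List String)) (b : PySem.Dict String String) : Prop :=
  g.keys.Nodup ∧
  b.items = g.items.map (fun kl => (kl.1, kl.2.headD "")) ∧
  (∀ kl ∈ g.items, kl.2 ≠ [] ∧ ∀ x ∈ kl.2, x = kl.2.headD "")


theorem pvWindow_total (input : List String) (n : Nat) (idx : Int)
    (h1 : -(input.length : Int) ≤ idx) (h2 : idx + n ≤ (input.length : Int)) :
    ∃ w, pvWindow input idx n = some w ∧ w.length = n := by
  induction n generalizing idx with
  | zero => exact ⟨[], rfl, rfl⟩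
  | succ m ih =>
    have hin : PySem.Raise.InRange input.length idx := by
      constructor <;> omega
    have hg : (PySem.List.pyGet? input idx).isSome := by
      rw [Option.isSome_iff_ne_none]
      intro hc
      exact ((PySem.List.pyGet?_eq_none_iff _ _).mp hc) hin
    obtain ⟨t, ht⟩ := Option.isSome_iff_exists.mp hg
    obtain ⟨w, hw, hlen⟩ := ih (idx + 1) (by omega) (by omega)
    exact ⟨t :: w, by simp [pvWindow, ht, hw], by simp [hlen]⟩

theorem pvLoopA_eq_goA (input : List String) (pat : List String) (idx : Int) (w : List String)
    (b : PySem.Dict String String) (hw : pvWindow input idx pat.length = some w) :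
    pvLoopA input pat idx b = pvGoA (pat.zip w) b := by
  induction pat generalizing idx w b with
  | nil => simp [pvLoopA, pvGoA]
  | cons p rest ih =>
    simp only [List.length_cons, pvWindow] at hw
    cases hg : PySem.List.pyGet? input idx with
    | none => simp [hg] at hw
    | some t =>
      cases hrest : pvWindow input (idx + 1) rest.length with
      | none => simp [hg, hrest] at hw
      | some w' =>
        simp only [hg, hrest] at hw
        obtain rfl : t :: w' = w := by injection hw
        simp only [pvLoopA, hg, List.zip_cons_cons, pvGoA]
        by_cases hwld : pv_is_wildcard p
        · rw [if_pos hwld, if_pos hwld]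
          cases b.get? p with
          | none => dsimp only; exact ih (idx + 1) w' _ hrest
          | some v =>
            dsimp only
            split_ifs with hv
            · rfl
            · exact ih (idx + 1) w' _ hrest
        · rw [if_neg hwld, if_neg hwld]
          split_ifs with ht
          · rfl
          · exact ih (idx + 1) w' _ hrest


theorem pvGoA_none_of_lit (pairs : List (String × String)) (b : PySem.Dict String String)
    (h : pairs.any (fun pt => !(pv_is_wildcard pt.1) && pt.1 != pt.2) = true) :
    pvGoA pairs b = none := by
  induction pairs generalizing b with
  | nil => simp at h
  | cons pt rest ih =>
    obtain ⟨p, t⟩ := pt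
    simp only [List.any_cons, Bool.or_eq_true, Bool.and_eq_true, Bool.not_eq_true', bne_iff_ne] at h
    simp only [pvGoA]
    by_cases hwld : pv_is_wildcard p
    · rw [if_pos hwld]
      have hrest : rest.any (fun pt => !(pv_is_wildcard pt.1) && pt.1 != pt.2) = true := by
        rcases h with ⟨hw, _⟩ | h
        · simp [hwld] at hw
        · simpa using h
      cases b.get? p with
      | none => dsimp only; exact ih _ hrest
      | some v =>
        dsimp only
        split_ifs with hv
        · rfl
        · exact ih _ hrest
    · rw [if_neg hwld]
      split_ifs with ht
      · rfl
      · have hrest : rest.any (fun pt => !(pv_is_wildcard pt.1) && pt.1 != pt.2) = true := by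
          rcases h with ⟨_, hne⟩ | h
          · exact absurd hne.symm (by simpa using ht)
          · simpa using h
        exact ih _ hrest

theorem pvFoldG_getD (pairs : List (String × String)) (g : PySem.Dict String (List String)) (k : String) :
    (pvFoldG pairs g).getD k [] =
      g.getD k [] ++ (pairs.filter (fun pt => pv_is_wildcard pt.1 && pt.1 == k)).map (·.2) := by
  induction pairs generalizing g with
  | nil => simp [pvFoldG]
  | cons pt rest ih =>
    obtain ⟨p, t⟩ := pt
    simp only [pvFoldG, List.foldl_cons, List.filter_cons]
    by_cases hw : pv_is_wildcard p
    · rw [if_pos hw]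
      by_cases hk : p = k
      · subst hk
        simp only [hw, BEq.rfl, Bool.and_self, if_pos]
        rw [show (List.foldl (fun g pt => if pv_is_wildcard pt.1 = true then g.insert pt.1 (g.getD pt.1 [] ++ [pt.2]) else g) (g.insert p (g.getD p [] ++ [t])) rest) = pvFoldG rest (g.insert p (g.getD p [] ++ [t])) from rfl]
        rw [ih]
        rw [PySem.Dict.getD_insert_self]
        simp
      · rw [show (List.foldl (fun g pt => if pv_is_wildcard pt.1 = true then g.insert pt.1 (g.getD pt.1 [] ++ [pt.2]) else g) (g.insert p (g.getD p [] ++ [t])) rest) = pvFoldG rest (g.insert p (g.getD p [] ++ [t])) from rfl]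
        rw [ih, PySem.Dict.getD_insert_of_ne _ _ _ (fun h => hk h.symm)]
        split_ifs with hc
        · exact absurd hc (by simp [hk])
        · rfl
    · rw [if_neg hw]
      split_ifs with hc
      · exact absurd hc (by simp [hw])
      · exact ih g

theorem pvBad_of_entry (g : PySem.Dict String (List String)) (k : String)
    (hne : g.getD k [] ≠ [])
    (hbad : (g.getD k []).any (fun t => t != (g.getD k []).headD "") = true) :
    g.values.any (fun ts => ts.any (fun t => t != ts.headD "")) = true := by
  have hcon : g.contains k = true := by
    by_contra hc
    rw [PySem.Dict.getD_of_not_contains _ _ (by simpa using hc)] at hne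
    exact hne rfl
  have hmem : k ∈ g.keys := (PySem.Dict.contains_iff_mem_keys _ _).mp hcon
  have hsome : ∃ l, g.get? k = some l := by
    cases hg : g.get? k with
    | none => exact absurd ((PySem.Dict.get?_eq_none_iff_not_mem_keys _ _).mp hg) (by simpa using hmem)
    | some l => exact ⟨l, rfl⟩
  obtain ⟨l, hl⟩ := hsome
  have hgd : g.getD k [] = l := PySem.Dict.getD_of_get?_eq_some _ _ hl
  have hitems : (k, l) ∈ g.items := PySem.Dict.mem_items_of_get?_eq_some _ hl
  have hval : l ∈ g.values := by
    have : g.values = g.items.map (·.2) := rfl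
    rw [this]
    exact List.mem_map.mpr ⟨(k, l), hitems, rfl⟩
  rw [List.any_eq_true]
  exact ⟨l, hval, by rw [hgd] at hbad; exact hbad⟩

theorem pvKeys_eq (g : PySem.Dict String (List String)) (b : PySem.Dict String String)
    (h : b.items = g.items.map (fun kl => (kl.1, kl.2.headD ""))) : b.keys = g.keys := by
  show b.items.map (·.1) = g.items.map (·.1)
  rw [h, List.map_map]
  rfl

theorem pvGoA_eq_finish (pairs : List (String × String)) (g : PySem.Dict String (List String))
    (b : PySem.Dict String String) (hinv : pvInv g b)
    (h : pairs.any (fun pt => !(pv_is_wildcard pt.1) && pt.1 != pt.2) = false) :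
    pvGoA pairs b = pvFinish (pvFoldG pairs g) := by
  induction pairs generalizing g b with
  | nil =>
    obtain ⟨hnd, hitems, hcst⟩ := hinv
    have hbad : (g.values.any (fun ts => ts.any (fun t => t != ts.headD ""))) = false := by
      rw [Bool.eq_false_iff]
      intro hc
      rw [List.any_eq_true] at hc
      obtain ⟨ts, hts, hw⟩ := hc
      rw [List.any_eq_true] at hw
      obtain ⟨t, ht, hne⟩ := hw
      obtain ⟨⟨k, l⟩, hkl, rfl⟩ := List.mem_map.mp (show ts ∈ g.items.map (·.2) from hts)
      exact absurd ((hcst _ hkl).2 t ht) (by simpa using hne)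
    simp only [pvGoA, pvFoldG, List.foldl_nil, pvFinish, hbad, Bool.false_eq_true, if_false, hitems]
  | cons pt rest ih =>
    obtain ⟨p, t⟩ := pt
    obtain ⟨hnd, hitems, hcst⟩ := hinv
    rw [List.any_cons, Bool.or_eq_false_iff] at h
    obtain ⟨hhd, hrest⟩ := h
    simp only [pvGoA, pvFoldG, List.foldl_cons]
    by_cases hw : pv_is_wildcard p
    · rw [if_pos hw, if_pos hw]
      cases hb : b.get? p with
      | none =>
        dsimp only
        have hbk : p ∉ b.keys := (PySem.Dict.get?_eq_none_iff_not_mem_keys _ _).mp hb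
        have hgk : p ∉ g.keys := by rwa [pvKeys_eq g b hitems] at hbk
        have hgc : g.contains p = false := by
          rw [Bool.eq_false_iff]; intro hc; exact hgk ((PySem.Dict.contains_iff_mem_keys _ _).mp hc)
        have hbc : b.contains p = false := by
          rw [PySem.Dict.contains_eq_isSome_get?, hb]; rfl
        rw [PySem.Dict.getD_of_not_contains _ _ hgc]
        refine ih _ _ ⟨?_, ?_, ?_⟩ hrest
        · exact PySem.Dict.nodup_keys_insert _ _ _ hnd
        · rw [PySem.Dict.items_insert_of_not_contains _ _ hbc,
              PySem.Dict.items_insert_of_not_contains _ _ hgc, List.map_append, hitems]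
          rfl
        · intro kl hkl
          rw [PySem.Dict.items_insert_of_not_contains _ _ hgc] at hkl
          rcases List.mem_append.mp hkl with hm | hm
          · exact hcst _ hm
          · obtain rfl : kl = (p, [t]) := by simpa using hm
            exact ⟨by simp, by simp⟩
      | some v =>
        dsimp only
        -- v is the headD of g's list l at p
        obtain ⟨⟨k, l⟩, hkl, hpr⟩ := List.mem_map.mp (hitems ▸ PySem.Dict.mem_items_of_get?_eq_some _ hb :
          (p, v) ∈ g.items.map (fun kl => (kl.1, kl.2.headD "")))
        have hkp : p = k := (congrArg Prod.fst hpr).symm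
        have hvv : l.headD "" = v := congrArg Prod.snd hpr
        subst hkp
        subst hvv
        have hlne : l ≠ [] := (hcst _ hkl).1
        have hgp : g.get? p = some l := PySem.Dict.get?_of_mem_items _ hkl hnd
        have hgc : g.contains p = true := by rw [PySem.Dict.contains_eq_isSome_get?, hgp]; rfl
        have hgd : g.getD p [] = l := PySem.Dict.getD_of_get?_eq_some _ _ hgp
        rw [hgd]
        split_ifs with hv
        · -- conflict: A returns none; B's final groups are bad at p
          have hfd := pvFoldG_getD rest (g.insert p (l ++ [t])) p
          rw [PySem.Dict.getD_insert_self] at hfd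
          have hfinne : (pvFoldG rest (g.insert p (l ++ [t]))).getD p [] ≠ [] := by
            rw [hfd]; simp
          have hhead : ((pvFoldG rest (g.insert p (l ++ [t]))).getD p []).headD "" = l.headD "" := by
            rw [hfd]
            cases l with
            | nil => exact absurd rfl hlne
            | cons a as => rfl
          have hbad : ((pvFoldG rest (g.insert p (l ++ [t]))).getD p []).any
              (fun x => x != ((pvFoldG rest (g.insert p (l ++ [t]))).getD p []).headD "") = true := by
            rw [List.any_eq_true]
            refine ⟨t, ?_, ?_⟩
            · rw [hfd]; simp
            · rw [hhead]
              exact bne_iff_ne.mpr (fun e => hv e.symm)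
          have hB := pvBad_of_entry (pvFoldG rest (g.insert p (l ++ [t]))) p hfinne hbad
          show none = pvFinish (pvFoldG rest (g.insert p (l ++ [t])))
          rw [pvFinish, if_pos hB]
        · -- consistent repeat: bindings unchanged, p's group extended by its own head value
          have ht : l.headD "" = t := not_ne_iff.mp hv
          refine ih _ _ ⟨?_, ?_, ?_⟩ hrest
          · exact PySem.Dict.nodup_keys_insert _ _ _ hnd
          · rw [PySem.Dict.items_insert_of_contains _ _ hgc, List.map_map, hitems]
            refine List.map_congr_left (fun q hq => ?_)
            by_cases hqp : q.1 = p
            · have hq2 : q.2 = l := by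
                have := PySem.Dict.get?_of_mem_items _ (show (p, q.2) ∈ g.items by
                  rw [← hqp]; exact hq) hnd
                rw [hgp] at this; injection this with h'; exact h'.symm
              simp only [Function.comp_apply, hqp, beq_self_eq_true, if_pos, hq2]
              cases l with
              | nil => exact absurd rfl hlne
              | cons a as => rfl
            · simp only [Function.comp_apply, beq_iff_eq, hqp, if_false]
          · intro kl hkl2
            rw [PySem.Dict.items_insert_of_contains _ _ hgc] at hkl2
            obtain ⟨q, hq, hqe⟩ := List.mem_map.mp hkl2
            by_cases hqp : (q.1 == p) = true
            · rw [if_pos hqp] at hqe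
              subst hqe
              have hhd2 : (l ++ [t]).headD "" = l.headD "" := by
                cases l with
                | nil => exact absurd rfl hlne
                | cons a as => rfl
              refine ⟨by simp, fun x hx => ?_⟩
              rw [hhd2]
              rcases List.mem_append.mp hx with hx | hx
              · exact (hcst _ hkl).2 x hx
              · rw [List.mem_singleton.mp hx]; exact ht.symm
            · rw [if_neg hqp] at hqe
              subst hqe
              exact hcst _ hq
    · rw [if_neg hw, if_neg hw]
      have hpt : p = t := by
        rcases Bool.and_eq_false_iff.mp hhd with hc | hc
        · simp [hw] at hc
        · simpa using hc
      rw [if_neg (by simp [hpt])]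
      exact ih _ _ ⟨hnd, hitems, hcst⟩ hrest


theorem pvInv_empty : pvInv PySem.Dict.empty PySem.Dict.empty := by
  refine ⟨by simp [PySem.Dict.keys_empty], rfl, ?_⟩
  intro kl hkl
  simp [show (PySem.Dict.empty : PySem.Dict String (List String)).items = [] from rfl] at hkl

theorem pvAlt_unfold (input_tokens : List String) (pattern : List String) (start : Int) (w : List String)
    (hg : ¬ start + (pattern.length : Int) > (input_tokens.length : Int))
    (hw : pvWindow input_tokens start pattern.length = some w) :
    match_pattern_at_py_alt input_tokens pattern start =
      if (pattern.zip w).any (fun pt => !(pv_is_wildcard pt.1) && pt.1 != pt.2) then none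
      else pvFinish (pvFoldG (pattern.zip w) PySem.Dict.empty) := by
  unfold match_pattern_at_py_alt
  rw [if_neg hg, hw]
  rfl

-- ===== VERDICT (by name: the statement is the Claim_ definition above) =====
theorem match_pattern_at_py_spec : Claim_equal_match_pattern_at_py := by
  intro input_tokens pattern start _ hpre
  unfold Spec_match_pattern_at_py
  by_cases hg : start + (pattern.length : Int) > (input_tokens.length : Int)
  · unfold match_pattern_at_py match_pattern_at_py_alt
    rw [if_pos hg, if_pos hg]
  · have hwex : ∃ w, pvWindow input_tokens start pattern.length = some w ∧ w.length = pattern.length := by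
      rcases hpre with h | h | h
      · exact absurd h (by omega)
      · subst h; exact ⟨[], rfl, rfl⟩
      · exact pvWindow_total input_tokens pattern.length start h (by omega)
    obtain ⟨w, hw, _⟩ := hwex
    rw [pvAlt_unfold input_tokens pattern start w hg hw]
    have hA : match_pattern_at_py input_tokens pattern start = pvGoA (pattern.zip w) PySem.Dict.empty := by
      unfold match_pattern_at_py
      rw [if_neg hg]
      exact pvLoopA_eq_goA input_tokens pattern start w _ hw
    rw [hA]
    cases hp1 : (pattern.zip w).any (fun pt => !(pv_is_wildcard pt.1) && pt.1 != pt.2) with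
    | true =>
      rw [pvGoA_none_of_lit _ _ hp1]
      rfl
    | false =>
      rw [pvGoA_eq_finish _ _ _ pvInv_empty hp1]
      rfl
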